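-- pv_equiv track=rewrite | github.com/Decretum-Wu/RaphaelScriptHelper | GhHelper.py | get_unique_grid_positions
-- ===== SOURCE A (Python) =====
-- def get_center(grid_pos):
--     if grid_pos is None:
--         return None
--     row, col = grid_pos
--     x = 64 + (col - 1) * 136 + 68  # 计算x坐标：起点64 + (列数-1)*格子宽度 + 半宽
--     y = 508 + (row - 1) * 136 + 68  # 计算y坐标：起点508 + (行数-1)*格子高度 + 半高
--     return (x, y)
--
-- def get_grid_pos(screen_pos):
--     x, y = screen_pos
--     # 计算列号（横向格子）
--     col = (x - 64) // 136 + 1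
--     # 计算行号（纵向格子）
--     row = (y - 508) // 136 + 1
--     # 检查是否在棋盘有效范围内
--     if 1 <= col <= 7 and 1 <= row <= 9:
--         return (row, col)
--     else:
--         return None  # 坐标不在棋盘格子上
--
-- def get_unique_grid_positions(coords_list):
--     # 定义集合存储唯一的有效棋盘位置
--     unique_positions = set()
--
--     for screen_coord in coords_list:
--         grid_pos = get_grid_pos(screen_coord)  # 复用之前的坐标转换函数
--         grid_center_pos = get_center(grid_pos)
--         if grid_center_pos is not None:  # 过滤无效坐标
--             # 将位置转换为元组并存入集合（自动去重）
--             unique_positions.add(grid_center_pos)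
--
--     # 将集合转为有序列表（按行号、列号升序排列）
--     return sorted(unique_positions, key=lambda x: (x[0], x[1]))
-- ===== SOURCE B (Python) =====
-- def get_unique_grid_positions(coords_list):
--     # Enumerate the fixed 7x9 board cell by cell (column-major, which is already the
--     # sorted center order) and emit a cell's center iff some coordinate lands in it.
--     result = []
--     for col in range(1, 8):
--         for row in range(1, 10):
--             if any((x - 64) // 136 + 1 == col and (y - 508) // 136 + 1 == row
--                    for x, y in coords_list):
--                 result.append((64 + (col - 1) * 136 + 68, 508 + (row - 1) * 136 + 68))
--     return result
-- ===== Notes on version B (the rewrite author's own statement) =====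
-- stated objective: alternative
-- what changed: Instead of transforming each coordinate to a center, deduplicating with a hash set and sorting, B enumerates the fixed 7x9 board cell by cell in column-major (= sorted-center) order and emits a cell's center iff some input coordinate falls in that cell, so no dedup structure and no sort are needed.
import Mathlib
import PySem

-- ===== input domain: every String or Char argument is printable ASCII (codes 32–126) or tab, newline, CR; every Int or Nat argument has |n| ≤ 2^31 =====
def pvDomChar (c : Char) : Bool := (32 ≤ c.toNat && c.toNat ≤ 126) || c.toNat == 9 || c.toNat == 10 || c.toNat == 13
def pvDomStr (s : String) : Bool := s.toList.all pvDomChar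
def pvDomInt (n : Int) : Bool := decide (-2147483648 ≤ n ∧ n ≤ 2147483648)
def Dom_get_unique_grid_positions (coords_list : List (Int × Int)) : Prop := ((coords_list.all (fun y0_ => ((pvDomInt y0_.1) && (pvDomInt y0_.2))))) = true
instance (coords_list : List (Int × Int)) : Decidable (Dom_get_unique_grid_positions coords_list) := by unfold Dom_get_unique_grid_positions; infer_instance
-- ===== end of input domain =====

-- B enumerates the fixed 7x9 board cell by cell in column-major (= sorted-center) order and
-- emits a cell's center iff some coordinate lands in it, instead of A's per-coordinate
-- transform + hash-set dedup + sort (alternative algorithm, no sort or dedup structure).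


-- ===== PORT A =====
def pvA_get_center (grid_pos : Option (Int × Int)) : Option (Int × Int) :=
  match grid_pos with
  | none => none
  | some (row, col) =>
    let x := 64 + (col - 1) * 136 + 68
    let y := 508 + (row - 1) * 136 + 68
    some (x, y)

def pvA_get_grid_pos (screen_pos : Int × Int) : Option (Int × Int) :=
  let x := screen_pos.1
  let y := screen_pos.2
  let col := PySem.Int.floordiv (x - 64) 136 + 1
  let row := PySem.Int.floordiv (y - 508) 136 + 1
  if 1 ≤ col ∧ col ≤ 7 ∧ 1 ≤ row ∧ row ≤ 9 then some (row, col) else none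

def get_unique_grid_positions (coords_list : List (Int × Int)) : List (Int × Int) :=
  let unique_positions : PySem.Set (Int × Int) :=
    coords_list.foldl (fun unique_positions screen_coord =>
      match pvA_get_center (pvA_get_grid_pos screen_coord) with
      | some grid_center_pos => PySem.Set.add unique_positions grid_center_pos
      | none => unique_positions) PySem.Set.empty
  PySem.List.sorted2 unique_positions (fun x => x.1) (fun x => x.2)

-- ===== PORT B =====
def get_unique_grid_positions_alt (coords_list : List (Int × Int)) : List (Int × Int) :=
  (PySem.List.pyRange 1 8 1).foldl (fun result col =>
    (PySem.List.pyRange 1 10 1).foldl (fun result row =>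
      if coords_list.any (fun xy =>
          decide (PySem.Int.floordiv (xy.1 - 64) 136 + 1 = col ∧
                  PySem.Int.floordiv (xy.2 - 508) 136 + 1 = row)) then
        result ++ [(64 + (col - 1) * 136 + 68, 508 + (row - 1) * 136 + 68)]
      else result) result) []

-- ===== PRECONDITION & SPEC =====
def Spec_get_unique_grid_positions (coords_list : List (Int × Int)) (out : List (Int × Int)) : Prop := out = get_unique_grid_positions_alt coords_list
instance (coords_list : List (Int × Int)) (out : List (Int × Int)) : Decidable (Spec_get_unique_grid_positions coords_list out) := by unfold Spec_get_unique_grid_positions; infer_instance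

-- ===== CLAIM (what is proved, stated in full; the proofs are below) =====
def Claim_equal_get_unique_grid_positions : Prop := ∀ (coords_list : List (Int × Int)), Dom_get_unique_grid_positions coords_list → Spec_get_unique_grid_positions coords_list (get_unique_grid_positions coords_list)

-- ===== LEMMAS AND PROOFS =====

def pvKeyL (p : Int × Int) : Lex (Int × Int) := toLex (p.1, p.2)

theorem pvSorted2_eq (xs : List (Int × Int)) :
    PySem.List.sorted2 xs (fun x => x.1) (fun x => x.2) = PySem.List.sorted xs pvKeyL := by
  have hcomp : (fun a b : Int × Int => decide (a.1 < b.1) || (!decide (b.1 < a.1) && decide (a.2 < b.2)))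
      = (fun a b : Int × Int => decide (pvKeyL a < pvKeyL b)) := by
    funext a b
    rw [Bool.eq_iff_iff]
    simp only [Bool.or_eq_true, Bool.and_eq_true, Bool.not_eq_true', decide_eq_true_eq,
      decide_eq_false_iff_not, pvKeyL, Prod.Lex.lt_iff, ofLex_toLex]
    omega
  simp only [PySem.List.sorted2, PySem.List.sorted, hcomp]
  simp

def pvCond (xy : Int × Int) : Bool :=
  decide (1 ≤ PySem.Int.floordiv (xy.1 - 64) 136 + 1 ∧ PySem.Int.floordiv (xy.1 - 64) 136 + 1 ≤ 7 ∧
          1 ≤ PySem.Int.floordiv (xy.2 - 508) 136 + 1 ∧ PySem.Int.floordiv (xy.2 - 508) 136 + 1 ≤ 9)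

def pvCenter (xy : Int × Int) : Int × Int :=
  (64 + (PySem.Int.floordiv (xy.1 - 64) 136 + 1 - 1) * 136 + 68,
   508 + (PySem.Int.floordiv (xy.2 - 508) 136 + 1 - 1) * 136 + 68)

def pvVC (coords_list : List (Int × Int)) : List (Int × Int) :=
  (coords_list.filter pvCond).map pvCenter

theorem pvVC_cons (c : Int × Int) (t : List (Int × Int)) :
    pvVC (c :: t) = (if pvCond c = true then [pvCenter c] else []) ++ pvVC t := by
  simp only [pvVC, List.filter_cons]
  split <;> simp

theorem pvA_set (coords_list : List (Int × Int)) (s : PySem.Set (Int × Int)) :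
    coords_list.foldl (fun unique_positions screen_coord =>
      match pvA_get_center (pvA_get_grid_pos screen_coord) with
      | some grid_center_pos => PySem.Set.add unique_positions grid_center_pos
      | none => unique_positions) s = (pvVC coords_list).foldl PySem.Set.add s := by
  induction coords_list generalizing s with
  | nil => simp [pvVC]
  | cons c t ih =>
    rw [List.foldl_cons, ih, pvVC_cons]
    by_cases h : pvCond c = true
    · have h' := of_decide_eq_true h
      rw [if_pos h]
      simp only [pvA_get_grid_pos, pvA_get_center, if_pos h']
      simp [pvCenter]
    · have h' : ¬ _ := fun hc => h (decide_eq_true hc)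
      rw [if_neg h]
      simp only [pvA_get_grid_pos, pvA_get_center, if_neg h']
      simp

-- B-side abstractions: cell = (col, row), its center, the hit test, the board in column-major order
def pvCC (cell : Int × Int) : Int × Int :=
  (64 + (cell.1 - 1) * 136 + 68, 508 + (cell.2 - 1) * 136 + 68)

def pvHit (coords_list : List (Int × Int)) (cell : Int × Int) : Bool :=
  coords_list.any (fun xy =>
    decide (PySem.Int.floordiv (xy.1 - 64) 136 + 1 = cell.1 ∧
            PySem.Int.floordiv (xy.2 - 508) 136 + 1 = cell.2))

def pvGrid : List (Int × Int) :=
  (PySem.List.pyRange 1 8 1).flatMap (fun col =>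
    (PySem.List.pyRange 1 10 1).map (fun row => (col, row)))

theorem pvGrid_mem (c r : Int) : (c, r) ∈ pvGrid ↔ 1 ≤ c ∧ c ≤ 7 ∧ 1 ≤ r ∧ r ≤ 9 := by
  simp only [pvGrid, List.mem_flatMap, List.mem_map, PySem.List.mem_pyRange_one, Prod.mk.injEq]
  constructor
  · rintro ⟨col, hcol, row, hrow, rfl, rfl⟩; omega
  · rintro ⟨h1, h2, h3, h4⟩; exact ⟨c, by omega, r, by omega, rfl, rfl⟩

theorem pvB_eq (coords_list : List (Int × Int)) :
    get_unique_grid_positions_alt coords_list = (pvGrid.filter (pvHit coords_list)).map pvCC := by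
  unfold get_unique_grid_positions_alt
  have inner : ∀ (col : Int) (acc : List (Int × Int)),
      (PySem.List.pyRange 1 10 1).foldl (fun result row =>
        if coords_list.any (fun xy =>
            decide (PySem.Int.floordiv (xy.1 - 64) 136 + 1 = col ∧
                    PySem.Int.floordiv (xy.2 - 508) 136 + 1 = row)) then
          result ++ [(64 + (col - 1) * 136 + 68, 508 + (row - 1) * 136 + 68)]
        else result) acc
      = acc ++ (((PySem.List.pyRange 1 10 1).map (fun row => (col, row))).filter
          (pvHit coords_list)).map pvCC := by
    intro col acc
    have hfun : (fun (result : List (Int × Int)) (row : Int) =>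
        if coords_list.any (fun xy =>
            decide (PySem.Int.floordiv (xy.1 - 64) 136 + 1 = col ∧
                    PySem.Int.floordiv (xy.2 - 508) 136 + 1 = row)) then
          result ++ [(64 + (col - 1) * 136 + 68, 508 + (row - 1) * 136 + 68)]
        else result)
        = (fun result row =>
          if pvHit coords_list (col, row) then result ++ [pvCC (col, row)] else result) := rfl
    rw [hfun, PySem.List.foldl_append_if (fun row => pvHit coords_list (col, row))
      (fun row => pvCC (col, row)), List.filter_map, List.map_map]
    rfl
  have outer : ∀ (cols : List Int) (acc : List (Int × Int)),
      cols.foldl (fun result col =>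
        (PySem.List.pyRange 1 10 1).foldl (fun result row =>
          if coords_list.any (fun xy =>
              decide (PySem.Int.floordiv (xy.1 - 64) 136 + 1 = col ∧
                      PySem.Int.floordiv (xy.2 - 508) 136 + 1 = row)) then
            result ++ [(64 + (col - 1) * 136 + 68, 508 + (row - 1) * 136 + 68)]
          else result) result) acc
      = acc ++ ((cols.flatMap (fun col =>
          (PySem.List.pyRange 1 10 1).map (fun row => (col, row)))).filter
            (pvHit coords_list)).map pvCC := by
    intro cols
    induction cols with
    | nil => intro acc; simp
    | cons c t ih =>
      intro acc
      rw [List.foldl_cons, inner c acc, ih]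
      simp [List.filter_append, List.map_append, List.append_assoc]
  rw [outer]
  rfl

theorem pvB_pairwise (coords_list : List (Int × Int)) :
    ((pvGrid.filter (pvHit coords_list)).map pvCC).Pairwise (fun a b => pvKeyL a < pvKeyL b) := by
  rw [List.pairwise_map]
  have h : pvGrid.Pairwise (fun a b : Int × Int => pvKeyL (pvCC a) < pvKeyL (pvCC b)) := by
    decide
  exact h.sublist List.filter_sublist

theorem pvB_mem (coords_list : List (Int × Int)) (x : Int × Int) :
    x ∈ (pvGrid.filter (pvHit coords_list)).map pvCC ↔ x ∈ pvVC coords_list := by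
  simp only [List.mem_map, List.mem_filter, pvVC, pvHit, List.any_eq_true, decide_eq_true_eq]
  constructor
  · rintro ⟨⟨c, r⟩, ⟨hmem, xy, hxy, h1, h2⟩, rfl⟩
    rw [pvGrid_mem] at hmem
    subst h1; subst h2
    exact ⟨xy, ⟨hxy, by simp only [pvCond, decide_eq_true_eq]; omega⟩, rfl⟩
  · rintro ⟨xy, ⟨hmem, hc⟩, rfl⟩
    simp only [pvCond, decide_eq_true_eq] at hc
    refine ⟨(PySem.Int.floordiv (xy.1 - 64) 136 + 1, PySem.Int.floordiv (xy.2 - 508) 136 + 1),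
      ⟨(pvGrid_mem _ _).2 (by omega), xy, hmem, rfl, rfl⟩, rfl⟩

-- ===== VERDICT (by name: the statement is the Claim_ definition above) =====
theorem get_unique_grid_positions_spec : Claim_equal_get_unique_grid_positions := by
  intro coords _
  unfold Spec_get_unique_grid_positions
  unfold get_unique_grid_positions
  rw [pvA_set]
  simp only []
  rw [pvSorted2_eq, pvB_eq]
  have hset : (pvVC coords).foldl PySem.Set.add PySem.Set.empty = PySem.Set.ofList (pvVC coords) := rfl
  rw [hset]
  apply PySem.List.sorted_eq_of_perm_of_pairwise_lt
  · have hp := pvB_pairwise coords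
    have hnd : ((pvGrid.filter (pvHit coords)).map pvCC).Nodup := by
      refine List.Pairwise.imp ?_ hp
      intro a b hab h
      subst h; exact lt_irrefl _ hab
    rw [List.perm_ext_iff_of_nodup hnd (PySem.Set.nodup_ofList _)]
    intro a
    rw [pvB_mem, PySem.Set.mem_ofList]
  · exact pvB_pairwise coords
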